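-- pv_equiv track=rewrite | github.com/sejaldua/synergy-scouting-app | MODULES/sequence_dump.py | get_player_play_dict
-- ===== SOURCE A (Python) =====
-- def get_player_play_dict(player_dict):
--     sequences = ["Spot-Up", "Transition", "Post-Up", "P&R Ball Handler", "Cut", "Hand Off", "Offensive Rebound", "Off Screen", "ISO", "P&R Roll Man", "Miscellaneous"]
--     player_play_dict = {}
--     for player in player_dict:
--         player_play_dict[player] = {}
--         for seq in sequences:
--             player_play_dict[player][seq] = []
--
--     for player in player_dict:
--         plays = player_dict[player]
--         for seq in sequences:
--             for play in plays:
--                 if play[1] == seq: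
--                     player_play_dict[player][seq].append(play)
--     return player_play_dict
-- ===== SOURCE B (Python) =====
-- def get_player_play_dict(player_dict):
--     sequences = ["Spot-Up", "Transition", "Post-Up", "P&R Ball Handler", "Cut", "Hand Off", "Offensive Rebound", "Off Screen", "ISO", "P&R Roll Man", "Miscellaneous"]
--     result = {}
--     for player, plays in player_dict.items():
--         buckets = [[] for _ in sequences]
--         for play in plays:
--             if play[1] in sequences:
--                 buckets[sequences.index(play[1])].append(play)
--         result[player] = dict(zip(sequences, buckets))
--     return result
-- ===== Notes on version B (the rewrite author's own statement) =====
-- stated objective: alternative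
-- what changed: B replaces A's nested dict-of-dicts built by 11 repeated scans of each play list with a single forward pass per player that appends each play into an index-addressed list of 11 buckets (via sequences.index), zipping the sequence names back on at the end; unknown labels are dropped as in A.
-- outside the precondition, e.g. on get_player_play_dict({'p': [['x']]}): A raises IndexError, B raises IndexError
import Mathlib
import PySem

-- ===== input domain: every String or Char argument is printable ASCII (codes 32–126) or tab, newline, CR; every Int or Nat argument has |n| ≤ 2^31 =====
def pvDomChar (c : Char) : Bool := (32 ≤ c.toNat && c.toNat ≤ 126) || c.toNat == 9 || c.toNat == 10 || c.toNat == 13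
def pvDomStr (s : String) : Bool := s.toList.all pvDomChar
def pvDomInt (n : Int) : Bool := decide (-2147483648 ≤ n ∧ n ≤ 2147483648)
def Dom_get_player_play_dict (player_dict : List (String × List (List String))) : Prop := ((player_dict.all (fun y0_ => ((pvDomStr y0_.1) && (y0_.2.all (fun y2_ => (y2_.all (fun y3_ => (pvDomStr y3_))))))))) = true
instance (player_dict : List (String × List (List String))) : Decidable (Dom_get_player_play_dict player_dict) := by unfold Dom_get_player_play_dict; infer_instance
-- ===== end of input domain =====

-- B groups each player's plays in one forward pass into an index-addressed list of
-- 11 buckets (buckets[sequences.index(play[1])].append, unknown labels dropped) and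
-- zips the sequence names back on, instead of A's nested dict-of-dicts filled by one
-- scan of the play list per sequence label; equivalence is proved on dicts with
-- unique player keys whose plays all have length ≥ 2.


-- the literal list of sequence labels both Pythons declare
def pvSequences : List String := ["Spot-Up", "Transition", "Post-Up", "P&R Ball Handler", "Cut", "Hand Off", "Offensive Rebound", "Off Screen", "ISO", "P&R Roll Man", "Miscellaneous"]

-- ===== PORT A =====
-- dicts are PySem.Dict built exactly as the Python does; the final value is returned
-- as the items lists (the association-list convention for dict results).
-- 'plays = player_dict[player]' is transliterated as the entry's own value e.2, which
-- under Pre_ (unique player keys) is exactly player_dict[player].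
def get_player_play_dict (player_dict : List (String × List (List String))) : List (String × List (String × List (List String))) :=
  (player_dict.foldl
    (fun acc e =>
      pvSequences.foldl
        (fun acc2 s =>
          e.2.foldl
            (fun acc3 play =>
              if PySem.List.pyGet? play 1 == some s then
                acc3.modify e.1 PySem.Dict.empty (fun d => d.modify s [] (fun v => v ++ [play]))
              else acc3)
            acc2)
        acc)
    (player_dict.foldl
      (fun acc e =>
        acc.insert e.1 (pvSequences.foldl (fun d s => d.insert s ([] : List (List String))) PySem.Dict.empty))
      PySem.Dict.empty)).items.map (fun p => (p.1, p.2.items))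

-- ===== PORT B =====
-- one pass per player over its plays: 'if play[1] in sequences:
-- buckets[sequences.index(play[1])].append(play)'. 'in' + '.index' are ported together
-- as one match on PySem.List.index? (some i exactly when the label is in the list, at
-- its first position); pyGet? play 1 = none is Python's IndexError, excluded by Pre_.
def pvBuckStep (bs : List (List (List String))) (play : List String) : List (List (List String)) :=
  match PySem.List.pyGet? play 1 with
  | some k =>
    match PySem.List.index? pvSequences k with
    | some i => bs.set i (bs.getD i [] ++ [play])
    | none => bs
  | none => bs

-- 'result[player] = dict(zip(sequences, buckets))': under Pre_ (unique player keys,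
-- and the 11 sequence labels are distinct) both dicts are built by fresh inserts, so
-- their items lists are the plain map / zip written here.
def get_player_play_dict_alt (player_dict : List (String × List (List String))) : List (String × List (String × List (List String))) :=
  player_dict.map (fun e =>
    (e.1, pvSequences.zip (e.2.foldl pvBuckStep (List.replicate pvSequences.length ([] : List (List String))))))

-- ===== PRECONDITION & SPEC =====
-- Pre_ excludes association lists with duplicate player keys (not representable as the
-- Python dict argument) and plays of length < 2, on which A raises IndexError at play[1].
def Pre_get_player_play_dict (player_dict : List (String × List (List String))) : Prop :=
  (player_dict.map Prod.fst).Nodup ∧ ∀ e ∈ player_dict, ∀ play ∈ e.2, 2 ≤ play.length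
instance (player_dict : List (String × List (List String))) : Decidable (Pre_get_player_play_dict player_dict) := by unfold Pre_get_player_play_dict; infer_instance
def pvWitness_get_player_play_dict : (List (String × List (List String))) :=
  [("alice", [["a", "Cut"], ["b", "ISO"]]), ("bob", [["c", "Nope"]])]
def Spec_get_player_play_dict (player_dict : List (String × List (List String))) (out : List (String × List (String × List (List String)))) : Prop := out = get_player_play_dict_alt player_dict
instance (player_dict : List (String × List (List String))) (out : List (String × List (String × List (List String)))) : Decidable (Spec_get_player_play_dict player_dict out) := by unfold Spec_get_player_play_dict; infer_instance

-- ===== CLAIM (what is proved, stated in full; the proofs are below) =====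
def Claim_equal_get_player_play_dict : Prop := ∀ (player_dict : List (String × List (List String))), Dom_get_player_play_dict player_dict → Pre_get_player_play_dict player_dict → Spec_get_player_play_dict player_dict (get_player_play_dict player_dict)

-- ===== LEMMAS AND PROOFS =====

-- the initial per-player dict with all 11 empty buckets (A's first loop body)
def pvD0 : PySem.Dict String (List (List String)) :=
  pvSequences.foldl (fun d s => d.insert s ([] : List (List String))) PySem.Dict.empty

def pvFilt (s : String) (plays : List (List String)) : List (List String) :=
  plays.filter (fun play => PySem.List.pyGet? play 1 == some s)

-- the common per-player result, as an items list
def pvCanon (plays : List (List String)) : List (String × List (List String)) :=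
  pvSequences.map (fun s => (s, pvFilt s plays))

-- A's per-player inner computation, started from d
def pvAIn (d : PySem.Dict String (List (List String))) (plays : List (List String)) : PySem.Dict String (List (List String)) :=
  pvSequences.foldl
    (fun d s =>
      plays.foldl
        (fun d play => if PySem.List.pyGet? play 1 == some s then d.modify s [] (fun v => v ++ [play]) else d)
        d)
    d

-- generic: a fold whose every step keeps the key list equal to K keeps it equal to K
theorem pv_keys_foldl_inv {α κ ν : Type} [BEq κ] (xs : List α) (G : PySem.Dict κ ν → α → PySem.Dict κ ν) (K : List κ)
    (h : ∀ acc a, a ∈ xs → acc.keys = K → (G acc a).keys = K) :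
    ∀ acc : PySem.Dict κ ν, acc.keys = K → (xs.foldl G acc).keys = K := by
  induction xs with
  | nil => intro acc hk; exact hk
  | cons x xs ih =>
    intro acc hk
    rw [List.foldl_cons]
    exact ih (fun acc a ha => h acc a (List.mem_cons_of_mem _ ha)) _
      (h acc x (List.mem_cons_self) hk)

-- generic: a fold whose step acts pointwise on getD acts on getD as a filtered fold
theorem pv_getD_foldl_pointwise {α κ ν : Type} [BEq κ] [DecidableEq κ] (xs : List α)
    (G : PySem.Dict κ ν → α → PySem.Dict κ ν) (key : α → κ) (T : α → ν → ν) (d0 : ν)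
    (h : ∀ (acc : PySem.Dict κ ν) a q, (G acc a).getD q d0 = if q = key a then T a (acc.getD (key a) d0) else acc.getD q d0) :
    ∀ (acc : PySem.Dict κ ν) (q : κ),
      (xs.foldl G acc).getD q d0
        = (xs.filter (fun a => decide (key a = q))).foldl (fun v a => T a v) (acc.getD q d0) := by
  induction xs with
  | nil => intro acc q; rfl
  | cons x xs ih =>
    intro acc q
    rw [List.foldl_cons, ih, h]
    by_cases hq : q = key x
    · simp [List.filter_cons, hq]
    · have hne : key x ≠ q := fun h' => hq h'.symm
      simp [List.filter_cons, hne, hq]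

-- filtering a list with Nodup keys for one present key yields exactly that entry
theorem pv_filter_key_single {α κ : Type} [DecidableEq κ] (key : α → κ) :
    ∀ (l : List α) (e : α), (l.map key).Nodup → e ∈ l →
      l.filter (fun a => decide (key a = key e)) = [e] := by
  intro l
  induction l with
  | nil => intro e _ he; cases he
  | cons x xs ih =>
    intro e hnd he
    simp only [List.map_cons, List.nodup_cons] at hnd
    rcases List.mem_cons.mp he with rfl | he'
    · have : xs.filter (fun a => decide (key a = key e)) = [] := by
        apply List.filter_eq_nil_iff.mpr
        intro a ha
        simp only [decide_eq_true_eq]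
        intro hk
        exact hnd.1 (hk ▸ List.mem_map_of_mem ha)
      simp [List.filter_cons, this]
    · have hne : key x ≠ key e := by
        intro hk
        exact hnd.1 (hk ▸ List.mem_map_of_mem he')
      simp only [List.filter_cons, decide_eq_true_eq]
      rw [if_neg hne]
      exact ih e hnd.2 he'

theorem pv_d0_keys : pvD0.keys = pvSequences := by decide

theorem pv_seq_nodup : pvSequences.Nodup := by decide

theorem pv_d0_getD (s : String) : pvD0.getD s [] = [] := by
  simp only [pvD0, pvSequences, List.foldl_cons, List.foldl_nil, PySem.Dict.getD_insert,
    PySem.Dict.getD_empty]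
  split_ifs <;> rfl

-- A's inner plays-fold on the bucket dict, pointwise
theorem pv_inner_plays_getD (s : String) (plays : List (List String)) (d : PySem.Dict String (List (List String))) (q : String) :
    (plays.foldl
        (fun d play => if PySem.List.pyGet? play 1 == some s then d.modify s [] (fun v => v ++ [play]) else d)
        d).getD q []
      = if q = s then d.getD s [] ++ pvFilt s plays else d.getD q [] := by
  induction plays generalizing d with
  | nil => by_cases hq : q = s <;> simp [pvFilt, hq]
  | cons play rest ih =>
    rw [List.foldl_cons]
    cases hc : (PySem.List.pyGet? play 1 == some s) with
    | true =>
      rw [if_pos rfl, ih]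
      by_cases hq : q = s <;>
        simp [PySem.Dict.getD_modify, hq, pvFilt, List.filter_cons, hc]
    | false =>
      rw [if_neg (by simp), ih]
      have hf : pvFilt s (play :: rest) = pvFilt s rest := by
        simp [pvFilt, List.filter_cons, hc]
      rw [hf]

theorem pv_AIn_keys (d : PySem.Dict String (List (List String))) (plays : List (List String))
    (hd : d.keys = pvSequences) : (pvAIn d plays).keys = pvSequences := by
  unfold pvAIn
  refine pv_keys_foldl_inv pvSequences _ pvSequences ?_ d hd
  intro acc s hs hacc
  refine pv_keys_foldl_inv plays _ pvSequences ?_ acc hacc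
  intro acc2 play _ hacc2
  by_cases hc : (PySem.List.pyGet? play 1 == some s) = true
  · rw [if_pos hc, PySem.Dict.keys_modify,
      PySem.Dict.keys_insert_of_contains _ _
        ((PySem.Dict.contains_iff_mem_keys _ _).mpr (hacc2 ▸ hs))]
    exact hacc2
  · rw [if_neg hc]; exact hacc2

theorem pv_AIn_getD (plays : List (List String)) (q : String) (hq : q ∈ pvSequences) :
    (pvAIn pvD0 plays).getD q [] = pvFilt q plays := by
  unfold pvAIn
  rw [pv_getD_foldl_pointwise pvSequences _ (fun s => s) (fun s v => v ++ pvFilt s plays) []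
      (fun acc s q' => by exact pv_inner_plays_getD s plays acc q')]
  rw [pv_filter_key_single (fun s => s) pvSequences q (by simpa using pv_seq_nodup) hq]
  simp [pv_d0_getD]

theorem pv_AIn_items (plays : List (List String)) : (pvAIn pvD0 plays).items = pvCanon plays := by
  have hk : (pvAIn pvD0 plays).keys = pvSequences := pv_AIn_keys pvD0 plays pv_d0_keys
  rw [PySem.Dict.items_eq_map_keys _ (by rw [hk]; exact pv_seq_nodup) ([] : List (List String)), hk]
  unfold pvCanon
  exact List.map_congr_left (fun s hs => by rw [pv_AIn_getD plays s hs])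

-- ===== B-side lemmas: the index-addressed bucket fold =====

theorem pv_step_none {play : List String} (hg : PySem.List.pyGet? play 1 = none)
    (bs : List (List (List String))) : pvBuckStep bs play = bs := by
  simp [pvBuckStep, hg]

theorem pv_step_noidx {play : List String} {k : String} (hg : PySem.List.pyGet? play 1 = some k)
    (hi : PySem.List.index? pvSequences k = none)
    (bs : List (List (List String))) : pvBuckStep bs play = bs := by
  rw [PySem.List.index?_eq_idxOf?] at hi
  simp [pvBuckStep, hg, hi]

theorem pv_step_idx {play : List String} {k : String} {i : Nat} (hg : PySem.List.pyGet? play 1 = some k)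
    (hi : PySem.List.index? pvSequences k = some i)
    (bs : List (List (List String))) : pvBuckStep bs play = bs.set i (bs.getD i [] ++ [play]) := by
  rw [PySem.List.index?_eq_idxOf?] at hi
  simp [pvBuckStep, hg, hi, List.getD]

-- the bucket fold preserves the length of the bucket list
theorem pv_buck_length (plays : List (List String)) :
    ∀ bs : List (List (List String)), (plays.foldl pvBuckStep bs).length = bs.length := by
  induction plays with
  | nil => intro bs; rfl
  | cons play rest ih =>
    intro bs
    rw [List.foldl_cons, ih]
    rcases hg : PySem.List.pyGet? play 1 with _ | k
    · rw [pv_step_none hg]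
    · rcases hi : PySem.List.index? pvSequences k with _ | i
      · rw [pv_step_noidx hg hi]
      · rw [pv_step_idx hg hi, List.length_set]

-- the j-th bucket after the fold is the old j-th bucket plus the plays labelled
-- with the j-th sequence, in order
theorem pv_buck_getD (plays : List (List String)) :
    ∀ (bs : List (List (List String))), bs.length = pvSequences.length →
      ∀ (j : Nat) (hj : j < pvSequences.length),
        (plays.foldl pvBuckStep bs).getD j [] = bs.getD j [] ++ pvFilt pvSequences[j] plays := by
  induction plays with
  | nil => intro bs _ j hj; simp [pvFilt]
  | cons play rest ih =>
    intro bs hlen j hj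
    rw [List.foldl_cons]
    rcases hg : PySem.List.pyGet? play 1 with _ | k
    · rw [pv_step_none hg, ih bs hlen j hj,
        show pvFilt pvSequences[j] (play :: rest) = pvFilt pvSequences[j] rest by
          simp [pvFilt, List.filter_cons, hg]]
    · rcases hi : PySem.List.index? pvSequences k with _ | i
      · have hk : k ∉ pvSequences := (PySem.List.index?_eq_none_iff _ _).mp hi
        have hne : k ≠ pvSequences[j] := fun h => hk (h ▸ List.getElem_mem hj)
        rw [pv_step_noidx hg hi, ih bs hlen j hj,
          show pvFilt pvSequences[j] (play :: rest) = pvFilt pvSequences[j] rest by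
            simp only [pvFilt, List.filter_cons, hg]
            simp [hne]]
      · obtain ⟨hilt, hival, _⟩ := PySem.List.getElem_of_index?_eq_some hi
        have hlen' : (bs.set i (bs.getD i [] ++ [play])).length = pvSequences.length := by
          rw [List.length_set]; exact hlen
        rw [pv_step_idx hg hi, ih _ hlen' j hj]
        by_cases hji : j = i
        · subst hji
          rw [show pvFilt pvSequences[j] (play :: rest) = play :: pvFilt pvSequences[j] rest by
              simp [pvFilt, List.filter_cons, hg, hival],
            List.getD_eq_getElem _ [] (show j < (bs.set j (bs.getD j [] ++ [play])).length by rw [hlen']; exact hj),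
            List.getElem_set_self]
          simp
        · have hne : k ≠ pvSequences[j] := by
            intro h
            have : pvSequences[j] = pvSequences[i] := by rw [← h, hival]
            exact hji ((List.Nodup.getElem_inj_iff pv_seq_nodup).mp this)
          rw [show pvFilt pvSequences[j] (play :: rest) = pvFilt pvSequences[j] rest by
              simp only [pvFilt, List.filter_cons, hg]
              simp [hne],
            List.getD_eq_getElem _ [] (show j < (bs.set i (bs.getD i [] ++ [play])).length by rw [hlen']; exact hj),
            List.getElem_set_ne (fun h => hji h.symm),
            ← List.getD_eq_getElem bs [] (hlen ▸ hj)]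

-- B's per-player value equals the canonical grouping
theorem pv_buck_canon (plays : List (List String)) :
    pvSequences.zip (plays.foldl pvBuckStep (List.replicate pvSequences.length ([] : List (List String)))) = pvCanon plays := by
  have hlen : (plays.foldl pvBuckStep (List.replicate pvSequences.length ([] : List (List String)))).length = pvSequences.length := by
    rw [pv_buck_length, List.length_replicate]
  apply List.ext_getElem
  · simp [pvCanon, List.length_zip, hlen]
  · intro j h1 h2
    have hj : j < pvSequences.length := lt_of_lt_of_le h1 (by simp [List.length_zip, hlen])
    have hj' : j < (plays.foldl pvBuckStep (List.replicate pvSequences.length ([] : List (List String)))).length := by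
      rw [hlen]; exact hj
    have hb := pv_buck_getD plays (List.replicate pvSequences.length ([] : List (List String)))
      (by simp) j hj
    have hrep : (List.replicate pvSequences.length ([] : List (List String))).getD j [] = [] := by
      rw [List.getD_eq_getElem _ _ (by simpa using hj)]; simp
    rw [List.getD_eq_getElem _ [] hj', hrep, List.nil_append] at hb
    simp only [List.getElem_zip, pvCanon, List.getElem_map]
    exact Prod.ext rfl hb

-- ===== outer-dict lemmas (A's two player loops) =====

def pvPhase1 (pd : List (String × List (List String))) : PySem.Dict String (PySem.Dict String (List (List String))) :=
  pd.foldl (fun acc e => acc.insert e.1 pvD0) PySem.Dict.empty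

def pvPhase2 (pd : List (String × List (List String))) : PySem.Dict String (PySem.Dict String (List (List String))) :=
  pd.foldl
    (fun acc e =>
      pvSequences.foldl
        (fun acc2 s =>
          e.2.foldl
            (fun acc3 play =>
              if PySem.List.pyGet? play 1 == some s then
                acc3.modify e.1 PySem.Dict.empty (fun d => d.modify s [] (fun v => v ++ [play]))
              else acc3)
            acc2)
        acc)
    (pvPhase1 pd)

-- the plays-fold of A's second loop touches only the key p of the outer dict
theorem pv_outer_plays_getD (p s : String) (plays : List (List String))
    (acc : PySem.Dict String (PySem.Dict String (List (List String)))) (q : String) :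
    (plays.foldl
        (fun a play =>
          if PySem.List.pyGet? play 1 == some s then
            a.modify p PySem.Dict.empty (fun d => d.modify s [] (fun v => v ++ [play]))
          else a)
        acc).getD q PySem.Dict.empty
      = if q = p then
          plays.foldl
            (fun d play => if PySem.List.pyGet? play 1 == some s then d.modify s [] (fun v => v ++ [play]) else d)
            (acc.getD p PySem.Dict.empty)
        else acc.getD q PySem.Dict.empty := by
  induction plays generalizing acc with
  | nil => by_cases hq : q = p <;> simp [hq]
  | cons play rest ih =>
    rw [List.foldl_cons, List.foldl_cons]
    by_cases hc : (PySem.List.pyGet? play 1 == some s) = true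
    · rw [if_pos hc, if_pos hc, ih]
      by_cases hq : q = p <;> simp [PySem.Dict.getD_modify, hq]
    · rw [if_neg hc, if_neg hc, ih]

-- the whole per-player body of A's second loop touches only key p
theorem pv_outer_seqs_getD (p : String) (plays : List (List String))
    (acc : PySem.Dict String (PySem.Dict String (List (List String)))) (q : String) :
    (pvSequences.foldl
        (fun acc2 s =>
          plays.foldl
            (fun a play =>
              if PySem.List.pyGet? play 1 == some s then
                a.modify p PySem.Dict.empty (fun d => d.modify s [] (fun v => v ++ [play]))
              else a)
            acc2)
        acc).getD q PySem.Dict.empty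
      = if q = p then pvAIn (acc.getD p PySem.Dict.empty) plays else acc.getD q PySem.Dict.empty := by
  unfold pvAIn
  induction pvSequences generalizing acc with
  | nil => by_cases hq : q = p <;> simp [hq]
  | cons s ss ih =>
    rw [List.foldl_cons, List.foldl_cons, ih]
    by_cases hq : q = p
    · rw [if_pos hq, if_pos hq, pv_outer_plays_getD p s plays acc p, if_pos rfl]
    · rw [if_neg hq, if_neg hq, pv_outer_plays_getD p s plays acc q, if_neg hq]

theorem pv_phase1_getD (pd : List (String × List (List String)))
    (hnd : (pd.map Prod.fst).Nodup) (e : String × List (List String)) (he : e ∈ pd) :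
    (pvPhase1 pd).getD e.1 PySem.Dict.empty = pvD0 := by
  unfold pvPhase1
  rw [pv_getD_foldl_pointwise pd _ Prod.fst (fun _ _ => pvD0) PySem.Dict.empty
      (fun acc a q => by rw [PySem.Dict.getD_insert]),
    pv_filter_key_single Prod.fst pd e hnd he]
  rfl

theorem pv_phase2_getD (pd : List (String × List (List String)))
    (hnd : (pd.map Prod.fst).Nodup) (e : String × List (List String)) (he : e ∈ pd) :
    (pvPhase2 pd).getD e.1 PySem.Dict.empty = pvAIn pvD0 e.2 := by
  unfold pvPhase2
  rw [pv_getD_foldl_pointwise pd _ Prod.fst (fun a d => pvAIn d a.2) PySem.Dict.empty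
      (fun acc a q => by exact pv_outer_seqs_getD a.1 a.2 acc q),
    pv_filter_key_single Prod.fst pd e hnd he]
  simp only [List.foldl_cons, List.foldl_nil]
  rw [pv_phase1_getD pd hnd e he]

theorem pv_phase1_keys (pd : List (String × List (List String)))
    (hnd : (pd.map Prod.fst).Nodup) : (pvPhase1 pd).keys = pd.map Prod.fst := by
  unfold pvPhase1
  rw [PySem.Dict.keys_foldl_insert_key pd Prod.fst (fun _ _ => pvD0) PySem.Dict.empty]
  rw [PySem.Dict.keys_empty, PySem.Set.update_nil_left]
  exact PySem.Set.ofList_eq_self_of_nodup _ hnd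

theorem pv_phase2_keys (pd : List (String × List (List String)))
    (hnd : (pd.map Prod.fst).Nodup) : (pvPhase2 pd).keys = pd.map Prod.fst := by
  unfold pvPhase2
  refine pv_keys_foldl_inv pd _ (pd.map Prod.fst) ?_ (pvPhase1 pd) (pv_phase1_keys pd hnd)
  intro acc e he hacc
  refine pv_keys_foldl_inv pvSequences _ _ ?_ acc hacc
  intro acc2 s _ hacc2
  refine pv_keys_foldl_inv e.2 _ _ ?_ acc2 hacc2
  intro acc3 play _ hacc3
  by_cases hc : (PySem.List.pyGet? play 1 == some s) = true
  · rw [if_pos hc, PySem.Dict.keys_modify,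
      PySem.Dict.keys_insert_of_contains _ _
        ((PySem.Dict.contains_iff_mem_keys _ _).mpr (hacc3 ▸ List.mem_map_of_mem he))]
    exact hacc3
  · rw [if_neg hc]; exact hacc3

-- ===== VERDICT (by name: the statement is the Claim_ definition above) =====
theorem get_player_play_dict_spec : Claim_equal_get_player_play_dict := by
  intro pd _hdom hpre
  obtain ⟨hnd, _⟩ := hpre
  unfold Spec_get_player_play_dict
  have hA : get_player_play_dict pd = (pvPhase2 pd).items.map (fun p => (p.1, p.2.items)) := rfl
  rw [hA]
  rw [PySem.Dict.items_eq_map_keys _ (by rw [pv_phase2_keys pd hnd]; exact hnd) PySem.Dict.empty,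
    pv_phase2_keys pd hnd]
  unfold get_player_play_dict_alt
  rw [List.map_map, List.map_map]
  refine List.map_congr_left (fun e he => ?_)
  simp only [Function.comp]
  rw [pv_phase2_getD pd hnd e he, pv_AIn_items, pv_buck_canon]
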